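-- pv_equiv track=rewrite | github.com/paiml/depyler | examples/hard_sec_fletcher16.py | fletcher16_verify
-- ===== SOURCE A (Python) =====
-- from typing import List, Tuple
--
-- def fletcher16_verify(data: List[int], expected: int) -> bool:
--     sum1: int = 0
--     sum2: int = 0
--     for byte in data:
--         sum1 = (sum1 + byte) % 255
--         sum2 = (sum2 + sum1) % 255
--     computed: int = (sum2 << 8) | sum1
--     return computed == expected
-- ===== SOURCE B (Python) =====
-- from typing import List
--
-- def fletcher16_verify(data: List[int], expected: int) -> bool:
--     # Closed-form: sum1 is the plain sum mod 255; sum2 is the positionally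
--     # weighted sum (weight n-i for the i-th byte) mod 255, since each byte
--     # contributes to every later partial sum.
--     n = len(data)
--     sum1 = sum(data) % 255
--     sum2 = sum(b * (n - i) for i, b in enumerate(data)) % 255
--     return sum2 * 256 + sum1 == expected
-- ===== Notes on version B (the rewrite author's own statement) =====
-- stated objective: alternative
-- what changed: Replaces the sequential two-accumulator running-sum loop with a closed-form computation: sum1 = sum(data) % 255 and sum2 = weighted sum with positional weight (n - i), combined as sum2*256 + sum1 instead of shift/or.
import Mathlib
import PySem

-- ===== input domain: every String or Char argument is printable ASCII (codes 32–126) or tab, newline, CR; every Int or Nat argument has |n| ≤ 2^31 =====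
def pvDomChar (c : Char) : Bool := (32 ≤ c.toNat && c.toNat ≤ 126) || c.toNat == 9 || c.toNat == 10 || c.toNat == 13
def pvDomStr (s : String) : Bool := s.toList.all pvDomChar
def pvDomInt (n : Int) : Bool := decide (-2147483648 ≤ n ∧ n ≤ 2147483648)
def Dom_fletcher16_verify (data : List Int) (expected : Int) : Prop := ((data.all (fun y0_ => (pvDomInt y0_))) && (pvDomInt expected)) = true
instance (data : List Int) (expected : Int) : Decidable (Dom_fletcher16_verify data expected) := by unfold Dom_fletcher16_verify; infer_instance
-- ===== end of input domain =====

-- ===== PORT A =====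
-- B replaces A's sequential two-accumulator loop with a closed-form sum / weighted-sum computation (objective: alternative; return value only).
def fletcher16_verify (data : List Int) (expected : Int) : Bool :=
  let st := data.foldl
    (fun (s : Int × Int) byte =>
      let s1 := PySem.Int.mod (s.1 + byte) 255
      let s2 := PySem.Int.mod (s.2 + s1) 255
      (s1, s2)) (0, 0)
  let computed : Int := PySem.Int.bor (st.2 <<< (8 : Nat)) st.1
  computed == expected

-- ===== PORT B =====
def fletcher16_verify_alt (data : List Int) (expected : Int) : Bool :=
  let n : Int := data.length
  let sum1 := PySem.Int.mod data.sum 255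
  let sum2 := PySem.Int.mod
    ((PySem.List.enumerate data).foldl (fun (acc : Int) p => acc + p.2 * (n - p.1)) 0) 255
  sum2 * 256 + sum1 == expected

-- ===== PRECONDITION & SPEC =====
def Spec_fletcher16_verify (data : List Int) (expected : Int) (out : Bool) : Prop := out = fletcher16_verify_alt data expected
instance (data : List Int) (expected : Int) (out : Bool) : Decidable (Spec_fletcher16_verify data expected out) := by unfold Spec_fletcher16_verify; infer_instance

-- ===== CLAIM (what is proved, stated in full; the proofs are below) =====
def Claim_equal_fletcher16_verify : Prop := ∀ (data : List Int) (expected : Int), Dom_fletcher16_verify data expected → Spec_fletcher16_verify data expected (fletcher16_verify data expected)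

-- ===== LEMMAS AND PROOFS =====

-- recursive weighted sum: x at depth i from the end gets weight (remaining length)
def pvW : List Int → Int
  | [] => 0
  | x :: xs => ((xs.length : Int) + 1) * x + pvW xs

theorem pvMod255 (a : Int) : PySem.Int.mod a 255 = a % 255 :=
  PySem.Int.mod_eq_emod_of_pos (by norm_num)

theorem pvEnumFold (l : List Int) (s acc n : Int) :
    (PySem.List.enumerate l s).foldl (fun (a : Int) p => a + p.2 * (n - p.1)) acc
      = acc + pvW l + (n - s - l.length) * l.sum := by
  induction l generalizing s acc with
  | nil => simp [PySem.List.enumerate_nil, pvW]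
  | cons x xs ih =>
      rw [PySem.List.enumerate_cons, List.foldl_cons, ih]
      simp only [pvW, List.length_cons, List.sum_cons]
      push_cast
      ring

theorem pvLoopA (l : List Int) (a b : Int) :
    l.foldl (fun (s : Int × Int) byte =>
        let s1 := PySem.Int.mod (s.1 + byte) 255
        let s2 := PySem.Int.mod (s.2 + s1) 255
        (s1, s2)) (PySem.Int.mod a 255, PySem.Int.mod b 255)
      = (PySem.Int.mod (a + l.sum) 255,
         PySem.Int.mod (b + (l.length : Int) * a + pvW l) 255) := by
  induction l generalizing a b with
  | nil => simp [pvW]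
  | cons x xs ih =>
      rw [List.foldl_cons]
      simp only [pvMod255]
      have h1 : (a % 255 + x) % 255 = (a + x) % 255 := Int.emod_add_emod a 255 x
      have h2 : (b % 255 + (a + x) % 255) % 255 = (b + (a + x)) % 255 :=
        (Int.add_emod b (a + x) 255).symm
      rw [h1, h2]
      have hih := ih (a + x) (b + (a + x))
      simp only [pvMod255] at hih
      rw [hih]
      simp only [pvW, List.length_cons, List.sum_cons]
      rw [Prod.mk.injEq]
      constructor <;> (congr 1; push_cast; ring)

theorem pvBorBytes (a b : Int) (ha : 0 ≤ a) (hb0 : 0 ≤ b) (hb : b < 256) :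
    PySem.Int.bor (a <<< (8 : Nat)) b = a * 256 + b := by
  have hsh : a <<< (8 : Nat) = a * 256 := by
    rw [Int.shiftLeft_eq]; norm_num
  rw [hsh, PySem.Int.bor_of_nonneg (by positivity) hb0]
  have h2 : b.toNat < 2 ^ 8 := by omega
  have h1 : (a * 256).toNat = a.toNat <<< 8 := by
    rw [Nat.shiftLeft_eq]; norm_num; omega
  rw [h1, ← Nat.shiftLeft_add_eq_or_of_lt h2, Nat.shiftLeft_eq]
  push_cast
  omega

-- ===== VERDICT (by name: the statement is the Claim_ definition above) =====
theorem fletcher16_verify_spec : Claim_equal_fletcher16_verify := by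
  intro data expected _
  unfold Spec_fletcher16_verify
  have h0 : PySem.Int.mod 0 255 = (0 : Int) := by decide
  have hloop := pvLoopA data 0 0
  rw [h0] at hloop
  simp only [fletcher16_verify, fletcher16_verify_alt, hloop, pvEnumFold]
  have e1 : (0 : Int) + (data.length : Int) * 0 + pvW data = pvW data := by ring
  have e2 : (0 : Int) + data.sum = data.sum := by ring
  have e3 : (0 : Int) + pvW data + ((data.length : Int) - 0 - data.length) * data.sum
      = pvW data := by ring
  rw [e1, e2, e3]
  have ha : 0 ≤ PySem.Int.mod (pvW data) 255 := by
    rw [pvMod255]; exact Int.emod_nonneg _ (by norm_num)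
  have hb0 : 0 ≤ PySem.Int.mod data.sum 255 := by
    rw [pvMod255]; exact Int.emod_nonneg _ (by norm_num)
  have hb : PySem.Int.mod data.sum 255 < 256 := by
    rw [pvMod255]
    have := Int.emod_lt_of_pos data.sum (show (0:Int) < 255 by norm_num)
    omega
  rw [pvBorBytes _ _ ha hb0 hb]
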